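-- pv_equiv track=rewrite | github.com/Tan-Canh/dev-kata | HowBigHowFast/src/how_big.py | count_bit
-- ===== SOURCE A (Python) =====
-- def count_bit(number: int) -> int:
--     if number < 0:
--         raise ValueError("Required an unsigned integer")
--     if number in (0, 1):
--         return 1
--
--     count = 0
--     while number != 0:
--         number = number // 2
--         count += 1
--     return count
-- ===== SOURCE B (Python) =====
-- def count_bit(number: int) -> int:
--     if number < 0:
--         raise ValueError("Required an unsigned integer")
--     return len(bin(number)) - 2
-- ===== Notes on version B (the rewrite author's own statement) =====
-- stated objective: idiomatic
-- what changed: Replaced the explicit halving loop (with its 0/1 special case) by len(bin(number)) - 2, a string-representation bit count with no iteration; bin(0)='0b0' already gives 1.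
import Mathlib
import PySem

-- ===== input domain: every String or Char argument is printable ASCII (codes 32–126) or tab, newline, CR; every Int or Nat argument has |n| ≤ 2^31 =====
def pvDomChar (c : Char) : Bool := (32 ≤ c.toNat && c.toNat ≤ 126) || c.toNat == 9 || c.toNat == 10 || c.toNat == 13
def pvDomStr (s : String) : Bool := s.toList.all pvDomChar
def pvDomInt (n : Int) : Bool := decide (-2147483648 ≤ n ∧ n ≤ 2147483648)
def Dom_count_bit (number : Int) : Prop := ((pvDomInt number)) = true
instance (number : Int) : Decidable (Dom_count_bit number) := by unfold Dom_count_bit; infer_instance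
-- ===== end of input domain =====

-- B replaces A's halving loop by the idiomatic len(bin(number)) - 2; same ValueError guard on negatives.

-- ===== PORT A =====
-- the while loop: number = number // 2; count += 1 (nonnegative numbers only; recursion on toNat)
def pvLoopA (n : Nat) (count : Int) : Int :=
  if n = 0 then count else pvLoopA (n / 2) (count + 1)
decreasing_by exact Nat.div_lt_self (Nat.pos_of_ne_zero (by assumption)) (by norm_num)

def count_bit (number : Int) : Int :=
  if number < 0 then 0  -- A raises ValueError here; excluded by Pre_count_bit
  else if number = 0 ∨ number = 1 then 1
  else pvLoopA number.toNat 0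

-- ===== PORT B =====
-- bin(n) for n ≥ 0 is '0' :: 'b' :: digits; pvBinDigits builds the digit list like CPython's bin
def pvBinDigits (n : Nat) : List Char :=
  if n = 0 then [] else pvBinDigits (n / 2) ++ [if n % 2 = 1 then '1' else '0']
decreasing_by exact Nat.div_lt_self (Nat.pos_of_ne_zero (by assumption)) (by norm_num)

def pvBin (n : Nat) : List Char :=
  '0' :: 'b' :: (if n = 0 then ['0'] else pvBinDigits n)

def count_bit_alt (number : Int) : Int :=
  if number < 0 then 0  -- B raises ValueError here; excluded by Pre_count_bit
  else ((pvBin number.toNat).length : Int) - 2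

-- ===== PRECONDITION & SPEC =====
-- A (and B) raise ValueError on negative input; Pre_ admits exactly the unsigned integers.
def Pre_count_bit (number : Int) : Prop := 0 ≤ number
instance (number : Int) : Decidable (Pre_count_bit number) := by unfold Pre_count_bit; infer_instance
def pvWitness_count_bit : Int := (5)

def Spec_count_bit (number : Int) (out : Int) : Prop := out = count_bit_alt number
instance (number : Int) (out : Int) : Decidable (Spec_count_bit number out) := by unfold Spec_count_bit; infer_instance

-- ===== CLAIM (what is proved, stated in full; the proofs are below) =====
def Claim_equal_count_bit : Prop := ∀ (number : Int), Dom_count_bit number → Pre_count_bit number → Spec_count_bit number (count_bit number)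

-- ===== LEMMAS AND PROOFS =====
-- the loop with accumulator: pvLoopA n c = c + digit count
theorem pvLoopA_eq (n : Nat) (c : Int) : pvLoopA n c = c + (pvBinDigits n).length := by
  induction n using Nat.strong_induction_on generalizing c with
  | _ n ih =>
    rw [pvLoopA, pvBinDigits]
    by_cases h : n = 0
    · simp [h]
    · simp only [h, ite_false]
      rw [ih (n / 2) (Nat.div_lt_self (Nat.pos_of_ne_zero h) (by norm_num))]
      simp; ring

-- ===== VERDICT (by name: the statement is the Claim_ definition above) =====
theorem count_bit_spec : Claim_equal_count_bit := by
  intro number _ hpre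
  unfold Spec_count_bit count_bit count_bit_alt pvBin
  have hneg : ¬ number < 0 := not_lt.mpr hpre
  simp only [hneg, if_false]
  by_cases h01 : number = 0 ∨ number = 1
  · rcases h01 with h | h <;> subst h <;> simp [pvBinDigits]
  · have hn0 : number.toNat ≠ 0 := by
      omega
    simp only [h01, ite_false, hn0]
    rw [pvLoopA_eq]
    simp
    omega
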